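-- pv_equiv track=rewrite | github.com/Fencer4Life/spws-automated-ranklist | python/tools/remove_duplicate_fencers.py | compute_id_remap
-- ===== SOURCE A (Python) =====
-- def compute_id_remap(lines_to_remove: list[int], first_data_line: int = 9) -> dict[int, int]:
--     """Compute old_id → new_id mapping after removing specified lines.
--
--     first_data_line: line number of the first VALUES entry (id=1).
--     """
--     # Convert line numbers to fencer IDs
--     removed_ids = [line - first_data_line + 1 for line in lines_to_remove]
--     removed_set = set(removed_ids)
--
--     # Find max possible ID (generous upper bound)
--     max_id = max(removed_ids) + 200
--     remap = {}
--     shift = 0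
--     for old_id in range(1, max_id + 1):
--         if old_id in removed_set:
--             shift += 1
--             remap[old_id] = None  # deleted
--         else:
--             new_id = old_id - shift
--             if new_id != old_id:
--                 remap[old_id] = new_id
--
--     return remap
-- ===== SOURCE B (Python) =====
-- def compute_id_remap(lines_to_remove: list[int], first_data_line: int = 9) -> dict[int, int]:
--     """Segment-wise remap: sort the unique removed ids, then emit whole runs of
--     surviving ids between consecutive removals with a directly known shift."""
--     removed = sorted({line - first_data_line + 1 for line in lines_to_remove})
--     max_id = removed[-1] + 200
--     remap = {}
--     shift = 0
--     start = 1
--     for r in removed: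
--         if r < 1:
--             continue
--         if shift > 0:
--             for old_id in range(start, r):
--                 remap[old_id] = old_id - shift
--         remap[r] = None
--         shift += 1
--         start = r + 1
--     if shift > 0:
--         for old_id in range(start, max_id + 1):
--             remap[old_id] = old_id - shift
--     return remap
-- ===== Notes on version B (the rewrite author's own statement) =====
-- stated objective: alternative
-- what changed: Instead of scanning every id 1..max_id with a running shift accumulator, B sorts the unique removed ids and emits the output segment-wise: each run of surviving ids between consecutive removals is written with a directly known shift.
import Mathlib
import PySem

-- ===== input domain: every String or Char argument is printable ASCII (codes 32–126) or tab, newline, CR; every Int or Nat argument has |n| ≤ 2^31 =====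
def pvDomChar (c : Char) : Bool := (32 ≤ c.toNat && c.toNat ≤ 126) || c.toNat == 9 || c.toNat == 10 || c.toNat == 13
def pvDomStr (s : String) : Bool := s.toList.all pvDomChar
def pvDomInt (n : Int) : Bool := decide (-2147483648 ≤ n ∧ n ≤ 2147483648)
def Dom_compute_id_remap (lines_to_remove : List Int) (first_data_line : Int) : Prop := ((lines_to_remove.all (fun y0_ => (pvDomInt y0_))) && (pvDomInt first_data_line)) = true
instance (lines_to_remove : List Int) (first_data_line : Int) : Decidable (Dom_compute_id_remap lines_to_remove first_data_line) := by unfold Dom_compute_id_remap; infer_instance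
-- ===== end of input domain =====

-- B replaces A's per-id scan with running shift accumulator by a segment-wise emission
-- over the sorted unique removed ids (objective: alternative decomposition, same results).

-- ===== PORT A =====
-- the body of A's for-loop over range(1, max_id+1); state = (remap, shift)
def aLoopBody (removed_set : PySem.Set Int) (st : PySem.Dict Int (Option Int) × Int) (old_id : Int) :
    PySem.Dict Int (Option Int) × Int :=
  if PySem.Set.contains removed_set old_id then
    (st.1.insert old_id none, st.2 + 1)
  else
    if old_id - st.2 ≠ old_id then (st.1.insert old_id (some (old_id - st.2)), st.2)
    else st

def compute_id_remap (lines_to_remove : List Int) (first_data_line : Int) : List (Int × Option Int) :=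
  let removed_ids := lines_to_remove.map (fun line => line - first_data_line + 1)
  let removed_set : PySem.Set Int := PySem.Set.ofList removed_ids
  match PySem.List.max? removed_ids (fun x => x) with
  | none => []  -- Python's max() raises ValueError on an empty list; excluded by Pre_
  | some m =>
    let max_id := m + 200
    ((PySem.List.pyRange 1 (max_id + 1) 1).foldl (aLoopBody removed_set)
      (PySem.Dict.empty, 0)).1.items

-- ===== PORT B =====
-- 'for old_id in range(a, b): remap[old_id] = old_id - shift'
def bFill (shift : Int) (a b : Int) (d : PySem.Dict Int (Option Int)) : PySem.Dict Int (Option Int) :=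
  (PySem.List.pyRange a b 1).foldl (fun d old_id => d.insert old_id (some (old_id - shift))) d

-- the body of B's loop over the sorted unique removed ids; state = (remap, shift, start)
def bLoopBody (st : PySem.Dict Int (Option Int) × Int × Int) (r : Int) :
    PySem.Dict Int (Option Int) × Int × Int :=
  if r < 1 then st
  else
    let d := if 0 < st.2.1 then bFill st.2.1 st.2.2 r st.1 else st.1
    (d.insert r none, st.2.1 + 1, r + 1)

def compute_id_remap_alt (lines_to_remove : List Int) (first_data_line : Int) : List (Int × Option Int) :=
  let removed_ids := lines_to_remove.map (fun line => line - first_data_line + 1)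
  let removed := PySem.List.sorted (PySem.Set.ofList removed_ids) (fun x => x) false
  match PySem.List.pyGet? removed (-1) with
  | none => []  -- removed[-1] raises IndexError on an empty list; excluded by Pre_
  | some last =>
    let max_id := last + 200
    let st := removed.foldl bLoopBody (PySem.Dict.empty, 0, 1)
    (if 0 < st.2.1 then bFill st.2.1 st.2.2 (max_id + 1) st.1 else st.1).items

-- ===== PRECONDITION & SPEC =====
-- A raises ValueError (max() of an empty sequence) on the empty list; B raises IndexError there too.
def Pre_compute_id_remap (lines_to_remove : List Int) (first_data_line : Int) : Prop :=
  lines_to_remove ≠ []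
instance (lines_to_remove : List Int) (first_data_line : Int) : Decidable (Pre_compute_id_remap lines_to_remove first_data_line) := by unfold Pre_compute_id_remap; infer_instance

def pvWitness_compute_id_remap : List Int × Int := ([9, 12, 12], 9)

def Spec_compute_id_remap (lines_to_remove : List Int) (first_data_line : Int) (out : List (Int × Option Int)) : Prop := out = compute_id_remap_alt lines_to_remove first_data_line
instance (lines_to_remove : List Int) (first_data_line : Int) (out : List (Int × Option Int)) : Decidable (Spec_compute_id_remap lines_to_remove first_data_line out) := by unfold Spec_compute_id_remap; infer_instance

-- ===== CLAIM (what is proved, stated in full; the proofs are below) =====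
def Claim_equal_compute_id_remap : Prop := ∀ (lines_to_remove : List Int) (first_data_line : Int), Dom_compute_id_remap lines_to_remove first_data_line → Pre_compute_id_remap lines_to_remove first_data_line → Spec_compute_id_remap lines_to_remove first_data_line (compute_id_remap lines_to_remove first_data_line)

-- ===== LEMMAS AND PROOFS =====

lemma bFill_cons (shift a b : Int) (h : a < b) (d : PySem.Dict Int (Option Int)) :
    bFill shift a b d = bFill shift (a + 1) b (d.insert a (some (a - shift))) := by
  unfold bFill
  rw [PySem.List.pyRange_one_cons h]
  rfl



lemma A_clean_aux (S : PySem.Set Int) : ∀ (n : Nat) (a : Int) (d : PySem.Dict Int (Option Int)) (s : Int),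
    (∀ i : Int, a ≤ i → i < a + n → S.contains i = false) → 0 ≤ s →
    (PySem.List.pyRange a (a + n) 1).foldl (aLoopBody S) (d, s)
      = (if 0 < s then bFill s a (a + n) d else d, s) := by
  intro n
  induction n with
  | zero =>
    intro a d s _ _
    rw [PySem.List.pyRange_one_eq_nil (by omega)]
    simp [bFill, PySem.List.pyRange_one_eq_nil (show (a:Int) + 0 ≤ a by omega)]
  | succ n ih =>
    intro a d s hclean hs
    have hab : a < a + (n + 1 : Nat) := by push_cast; omega
    rw [PySem.List.pyRange_one_cons hab]
    have hca : S.contains a = false := hclean a le_rfl hab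
    simp only [List.foldl_cons]
    have hstep : aLoopBody S (d, s) a = if 0 < s then (d.insert a (some (a - s)), s) else (d, s) := by
      unfold aLoopBody
      rw [hca]
      by_cases h0 : 0 < s
      · rw [if_pos h0]
        simp only [Bool.false_eq_true, if_false]
        rw [if_pos (by omega : a - s ≠ a)]
      · have : s = 0 := by omega
        subst this
        simp
    rw [hstep]
    by_cases h0 : 0 < s
    · rw [if_pos h0]
      have := ih (a + 1) (d.insert a (some (a - s))) s
        (fun i h1 h2 => hclean i (by omega) (by push_cast at h2 ⊢; omega)) hs
      have harr : a + 1 + (n : Int) = a + ((n + 1 : Nat) : Int) := by push_cast; omega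
      rw [harr] at this
      rw [this, if_pos h0, if_pos h0, ← bFill_cons s a _ hab]
    · rw [if_neg h0]
      have := ih (a + 1) d s (fun i h1 h2 => hclean i (by omega) (by push_cast at h2 ⊢; omega)) hs
      have harr : a + 1 + (n : Int) = a + ((n + 1 : Nat) : Int) := by push_cast; omega
      rw [harr] at this
      rw [this, if_neg h0, if_neg h0]

lemma A_clean (S : PySem.Set Int) (a b : Int) (d : PySem.Dict Int (Option Int)) (s : Int)
    (h : ∀ i : Int, a ≤ i → i < b → S.contains i = false) (hs : 0 ≤ s) :
    (PySem.List.pyRange a b 1).foldl (aLoopBody S) (d, s) = (if 0 < s then bFill s a b d else d, s) := by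
  by_cases hab : a ≤ b
  · have hb : b = a + ((b - a).toNat : Int) := by omega
    rw [hb]
    exact A_clean_aux S (b - a).toNat a d s (by rw [← hb]; exact h) hs
  · rw [PySem.List.pyRange_one_eq_nil (by omega)]
    simp [bFill, PySem.List.pyRange_one_eq_nil (show b ≤ a by omega)]


lemma main_lemma (S : PySem.Set Int) : ∀ (ps : List Int), ps.Pairwise (· < ·) →
    ∀ (N a : Int) (d : PySem.Dict Int (Option Int)) (s : Int), 1 ≤ a →
    (∀ i : Int, a ≤ i → i ≤ N → S.contains i = ps.contains i) →
    (∀ r ∈ ps, r ≤ N) →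
    (∀ r ∈ ps, 1 ≤ r → a ≤ r) →
    0 ≤ s →
    ((PySem.List.pyRange a (N + 1) 1).foldl (aLoopBody S) (d, s)).1 =
      (let st := ps.foldl bLoopBody (d, s, a);
       if 0 < st.2.1 then bFill st.2.1 st.2.2 (N + 1) st.1 else st.1) := by
  intro ps
  induction ps with
  | nil =>
    intro _ N a d s _ hmem _ _ hs
    have hclean : ∀ i : Int, a ≤ i → i < N + 1 → S.contains i = false := by
      intro i h1 h2
      rw [hmem i h1 (by omega)]
      simp
    rw [A_clean S a (N + 1) d s hclean hs]
    simp
  | cons r rest ih =>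
    intro hsorted N a d s ha hmem hub hlb hs
    have hsorted' : rest.Pairwise (· < ·) := hsorted.of_cons
    have hrlt : ∀ x ∈ rest, r < x := by
      intro x hx; exact List.rel_of_pairwise_cons hsorted hx
    simp only [List.foldl_cons]
    by_cases hr1 : r < 1
    · -- B skips r (r < 1); r is below A's scan range too since 1 ≤ a
      have hskip : bLoopBody (d, s, a) r = (d, s, a) := by
        unfold bLoopBody; rw [if_pos hr1]
      rw [hskip]
      refine ih hsorted' N a d s ha ?_ (fun x hx => hub x (List.mem_cons_of_mem r hx))
        (fun x hx h1 => hlb x (List.mem_cons_of_mem r hx) h1) hs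
      intro i h1 h2
      rw [hmem i h1 h2, List.contains_cons]
      have : (i == r) = false := by simp; omega
      rw [this, Bool.false_or]
    · have har : a ≤ r := hlb r List.mem_cons_self (by omega)
      have hrN : r ≤ N := hub r List.mem_cons_self
      -- split A's range at r
      rw [PySem.List.pyRange_one_append a r (N + 1) har (by omega),
          PySem.List.pyRange_one_cons (show r < N + 1 by omega), List.foldl_append]
      have hclean : ∀ i : Int, a ≤ i → i < r → S.contains i = false := by
        intro i h1 h2
        rw [hmem i h1 (by omega), List.contains_cons]
        have h3 : (i == r) = false := by simp; omega
        rw [h3, Bool.false_or]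
        by_contra hc
        have : i ∈ rest := by
          simpa using (Bool.not_eq_false _).mp hc
        have := hrlt i this
        omega
      rw [A_clean S a r d s hclean hs]
      simp only [List.foldl_cons]
      set d1 := if 0 < s then bFill s a r d else d with hd1
      have hstepA : aLoopBody S (d1, s) r = (d1.insert r none, s + 1) := by
        unfold aLoopBody
        have : S.contains r = true := by
          rw [hmem r har hrN]; simp
        rw [this]
        simp
      have hstepB : bLoopBody (d, s, a) r = (d1.insert r none, s + 1, r + 1) := by
        unfold bLoopBody
        rw [if_neg hr1]
      rw [hstepA, hstepB]
      refine ih hsorted' N (r + 1) (d1.insert r none) (s + 1) (by omega) ?_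
        (fun x hx => hub x (List.mem_cons_of_mem r hx))
        (fun x hx _ => by have := hrlt x hx; omega) (by omega)
      intro i h1 h2
      rw [hmem i (by omega) h2, List.contains_cons]
      have : (i == r) = false := by simp; omega
      rw [this, Bool.false_or]

lemma pairwise_le_getLast : ∀ (l : List Int), l.Pairwise (fun a b => a ≤ b) →
    ∀ last, l.getLast? = some last → ∀ y ∈ l, y ≤ last := by
  intro l
  induction l with
  | nil => intro _ last h; simp at h
  | cons x t ih =>
    intro hp last hl y hy
    cases t with
    | nil =>
      simp at hl hy; omega
    | cons z t' =>
      rw [List.getLast?_cons_cons] at hl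
      rcases List.mem_cons.mp hy with hy | hy
      · subst hy; exact List.rel_of_pairwise_cons hp (List.mem_of_getLast? hl)
      · exact ih hp.of_cons last hl y hy

-- ===== VERDICT (by name: the statement is the Claim_ definition above) =====
theorem compute_id_remap_spec : Claim_equal_compute_id_remap := by
  intro lines f _ hpre
  unfold Spec_compute_id_remap compute_id_remap compute_id_remap_alt
  simp only []
  set removed_ids := lines.map (fun line => line - f + 1) with hri
  have hne : removed_ids ≠ [] := by
    simp only [hri, ne_eq, List.map_eq_nil_iff]; exact hpre
  set S : PySem.Set Int := PySem.Set.ofList removed_ids with hS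
  set removed := PySem.List.sorted S (fun x => x) false with hrem
  cases hm : PySem.List.max? removed_ids (fun x => x) with
  | none => exact absurd ((PySem.List.max?_eq_none_iff removed_ids (fun x => x)).mp hm) hne
  | some m =>
  have hmax : ∀ y ∈ removed_ids, y ≤ m := by
    intro y hy; exact PySem.List.max?_isMax hm y hy
  have hmmem : m ∈ removed_ids := PySem.List.max?_mem hm
  have hmem_rem : ∀ x : Int, x ∈ removed ↔ x ∈ removed_ids := by
    intro x
    rw [hrem, PySem.List.mem_sorted, hS, PySem.Set.mem_ofList]
  have hrne : removed ≠ [] := by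
    intro h
    exact hne (List.eq_nil_iff_forall_not_mem.mpr
      (fun x hx => by rw [h] at hmem_rem; simpa using (hmem_rem x).mpr hx))
  rw [PySem.List.pyGet?_neg_one]
  cases hl : removed.getLast? with
  | none => exact absurd (List.getLast?_eq_none_iff.mp hl) hrne
  | some last =>
  have hlast_mem : last ∈ removed := List.mem_of_getLast? hl
  have hple : removed.Pairwise (fun a b => a ≤ b) := by
    have := PySem.List.sorted_pairwise (xs := S) (key := fun x => x)
    simpa [hrem] using this
  have hlm : last = m := by
    have h1 : last ≤ m := hmax last ((hmem_rem last).mp hlast_mem)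
    have h2 : m ≤ last :=
      pairwise_le_getLast removed hple last hl m ((hmem_rem m).mpr hmmem)
    omega
  subst hlm
  have hmain := main_lemma S removed
    (by simpa [hrem, hS] using PySem.List.sorted_ofList_pairwise_lt (xs := removed_ids))
    (last + 200) 1 PySem.Dict.empty 0 le_rfl
    (by
      intro i _ _
      have h2 : (i ∈ S) ↔ (i ∈ removed) := by rw [hS, PySem.Set.mem_ofList, hmem_rem]
      have c1 : S.contains i = decide (i ∈ S) := by
        simp
      have c2 : removed.contains i = decide (i ∈ removed) := by
        simp
      rw [c1, c2]
      exact decide_eq_decide.mpr h2)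
    (by intro r hr; have := hmax r ((hmem_rem r).mp hr); omega)
    (by intro r _ h; omega)
    le_rfl
  dsimp only at hmain ⊢
  rw [hmain]
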